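-- pv_equiv track=rewrite | github.com/evinces/whiteboarding-challenges | is-binary-tree/is-binary-tree.py | is_biniary_tree
-- ===== SOURCE A (Python) =====
-- def is_biniary_tree(node_pairs):
--     """Determine if node_pairs can be represented as a binary tree"""
--
--     root_count = 0
--     tree = {}
--
--     for parent, child in node_pairs:
--         if parent not in tree:
--             tree[parent] = {
--                 "left": child,
--                 "right": None,
--                 "parent": None
--             }
--             root_count += 1
--         elif tree[parent]["left"] is None:
--             tree[parent]["left"] = child
--         elif tree[parent]["right"] is None:
--             tree[parent]["right"] = child
--         else:
--             return False
--
--         if child not in tree: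
--             tree[child] = {
--                 "left": None,
--                 "right": None,
--                 "parent": parent
--             }
--         elif tree[child]["parent"] is None:
--             tree[child]["parent"] = parent
--             root_count -= 1
--         else:
--             return False
--
--     return root_count == 1
-- ===== SOURCE B (Python) =====
-- def is_biniary_tree(node_pairs):
--     """Determine if node_pairs can be represented as a binary tree"""
--     pairs = list(node_pairs)
--     outdeg = {}
--     indeg = {}
--     for parent, child in pairs:
--         outdeg[parent] = outdeg.get(parent, 0) + 1
--         indeg[child] = indeg.get(child, 0) + 1
--     nodes = list(outdeg) + [n for n in indeg if n not in outdeg]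
--     if any(outdeg.get(n, 0) > 2 or indeg.get(n, 0) > 1 for n in nodes):
--         return False
--     return sum(1 for n in nodes if n not in indeg) == 1
-- ===== Notes on version B (the rewrite author's own statement) =====
-- stated objective: simpler
-- what changed: Replaces A's incremental left/right/parent slot table with root_count bookkeeping and mid-loop early returns by one counting pass building out-degree/in-degree dicts followed by a separate validation pass (out-degree <= 2, in-degree <= 1, exactly one in-degree-0 node).
import Mathlib
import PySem

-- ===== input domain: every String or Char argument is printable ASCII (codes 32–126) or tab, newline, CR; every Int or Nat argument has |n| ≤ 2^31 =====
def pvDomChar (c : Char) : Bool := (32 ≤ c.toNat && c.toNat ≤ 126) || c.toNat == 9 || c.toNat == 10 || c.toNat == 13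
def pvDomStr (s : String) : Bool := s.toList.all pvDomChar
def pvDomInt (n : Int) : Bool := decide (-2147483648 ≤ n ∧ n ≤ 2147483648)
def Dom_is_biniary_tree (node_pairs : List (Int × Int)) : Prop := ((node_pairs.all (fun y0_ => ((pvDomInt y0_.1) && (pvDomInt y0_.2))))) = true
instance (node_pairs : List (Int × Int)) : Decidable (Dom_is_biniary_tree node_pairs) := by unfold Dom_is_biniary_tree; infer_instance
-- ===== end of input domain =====

-- B replaces A's incremental left/right/parent slot table and root_count bookkeeping by
-- degree counting (out-degree/in-degree dicts) followed by a separate validation pass.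


-- ===== PORT A =====
-- entry = (left, right, parent) slots of A's per-node dict
def isbtStepParent (tree : PySem.Dict Int (Option Int × Option Int × Option Int))
    (parent child : Int) (rc : Int) :
    Option (Int × PySem.Dict Int (Option Int × Option Int × Option Int)) :=
  match tree.get? parent with
  | none => some (rc + 1, tree.insert parent (some child, none, none))
  | some (l, r, p) =>
    if l = none then some (rc, tree.insert parent (some child, r, p))
    else if r = none then some (rc, tree.insert parent (l, some child, p))
    else none

def isbtStepChild (tree : PySem.Dict Int (Option Int × Option Int × Option Int))
    (parent child : Int) (rc : Int) :
    Option (Int × PySem.Dict Int (Option Int × Option Int × Option Int)) :=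
  match tree.get? child with
  | none => some (rc, tree.insert child (none, none, some parent))
  | some (l, r, p) =>
    if p = none then some (rc - 1, tree.insert child (l, r, some parent))
    else none

def isbtLoop (rc : Int) (tree : PySem.Dict Int (Option Int × Option Int × Option Int)) :
    List (Int × Int) → Bool
  | [] => decide (rc = 1)
  | (parent, child) :: rest =>
    match isbtStepParent tree parent child rc with
    | none => false
    | some (rc1, tree1) =>
      match isbtStepChild tree1 parent child rc1 with
      | none => false
      | some (rc2, tree2) => isbtLoop rc2 tree2 rest

def is_biniary_tree (node_pairs : List (Int × Int)) : Bool :=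
  isbtLoop 0 PySem.Dict.empty node_pairs

-- ===== PORT B =====
def is_biniary_tree_alt (node_pairs : List (Int × Int)) : Bool :=
  let pairs := node_pairs
  let degs := pairs.foldl
    (fun (st : PySem.Dict Int Int × PySem.Dict Int Int) pc =>
      (st.1.insert pc.1 (st.1.getD pc.1 0 + 1), st.2.insert pc.2 (st.2.getD pc.2 0 + 1)))
    (PySem.Dict.empty, PySem.Dict.empty)
  let outdeg := degs.1
  let indeg := degs.2
  let nodes := outdeg.keys ++ indeg.keys.filter (fun n => !(outdeg.contains n))
  if nodes.any (fun n => decide (outdeg.getD n 0 > 2) || decide (indeg.getD n 0 > 1)) then false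
  else decide ((nodes.countP (fun n => !(indeg.contains n)) : Int) = 1)

-- ===== PRECONDITION & SPEC =====
def Spec_is_biniary_tree (node_pairs : List (Int × Int)) (out : Bool) : Prop := out = is_biniary_tree_alt node_pairs
instance (node_pairs : List (Int × Int)) (out : Bool) : Decidable (Spec_is_biniary_tree node_pairs out) := by unfold Spec_is_biniary_tree; infer_instance

-- ===== CLAIM (what is proved, stated in full; the proofs are below) =====
def Claim_equal_is_biniary_tree : Prop := ∀ (node_pairs : List (Int × Int)), Dom_is_biniary_tree node_pairs → Spec_is_biniary_tree node_pairs (is_biniary_tree node_pairs)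

-- ===== LEMMAS AND PROOFS =====

-- parent-count and child-count of a node in a pair list
def pcN (L : List (Int × Int)) (x : Int) : Nat := (L.map Prod.fst).count x
def ccN (L : List (Int × Int)) (x : Int) : Nat := (L.map Prod.snd).count x

-- the node list B builds (keys of the two counters, deduplicated in order)
def nodesOf (L : List (Int × Int)) : List Int :=
  PySem.List.dedup (L.map Prod.fst) ++
    (PySem.List.dedup (L.map Prod.snd)).filter (fun n => !((L.map Prod.fst).contains n))

-- B's result, phrased over counts
def specB (L : List (Int × Int)) : Bool :=
  if (nodesOf L).any (fun n => decide ((((L.map Prod.fst).count n : Int)) > 2)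
      || decide ((((L.map Prod.snd).count n : Int)) > 1)) then false
  else decide (((nodesOf L).countP (fun n => !((L.map Prod.snd).contains n)) : Int) = 1)

lemma mem_nodesOf (L : List (Int × Int)) (x : Int) :
    x ∈ nodesOf L ↔ x ∈ L.map Prod.fst ∨ x ∈ L.map Prod.snd := by
  simp [nodesOf]
  tauto

lemma nodup_nodesOf (L : List (Int × Int)) : (nodesOf L).Nodup := by
  unfold nodesOf
  refine List.Nodup.append (PySem.List.nodup_dedup _) ((PySem.List.nodup_dedup _).filter _) ?_
  intro a ha hb
  simp [List.mem_filter] at ha hb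
  obtain ⟨y, hy⟩ := ha
  exact hb.2 y hy

lemma degs_split (L : List (Int × Int)) : ∀ (d1 d2 : PySem.Dict Int Int),
    L.foldl (fun (st : PySem.Dict Int Int × PySem.Dict Int Int) pc =>
      (st.1.insert pc.1 (st.1.getD pc.1 0 + 1), st.2.insert pc.2 (st.2.getD pc.2 0 + 1)))
      (d1, d2)
    = ((L.map Prod.fst).foldl (fun d x => d.insert x (d.getD x 0 + 1)) d1,
       (L.map Prod.snd).foldl (fun d x => d.insert x (d.getD x 0 + 1)) d2) := by
  induction L with
  | nil => simp
  | cons hd tl ih => intro d1 d2; simp [List.foldl_cons, ih]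

lemma alt_eq_specB (L : List (Int × Int)) : is_biniary_tree_alt L = specB L := by
  simp only [is_biniary_tree_alt, degs_split, PySem.Dict.foldl_insert_getD_add_one_eq_counter,
    PySem.Dict.keys_counter, PySem.Dict.contains_counter, PySem.Dict.getD_counter, specB, nodesOf,
    PySem.List.dedup_eq_ofList]
  rfl

lemma specB_false_of_bad (L : List (Int × Int)) (x : Int)
    (hm : x ∈ L.map Prod.fst ∨ x ∈ L.map Prod.snd)
    (hb : 2 < pcN L x ∨ 1 < ccN L x) : specB L = false := by
  have hany : (nodesOf L).any (fun n => decide ((((L.map Prod.fst).count n : Int)) > 2)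
      || decide ((((L.map Prod.snd).count n : Int)) > 1)) = true := by
    rw [List.any_eq_true]
    refine ⟨x, (mem_nodesOf L x).2 hm, ?_⟩
    simp [pcN, ccN] at hb ⊢
    omega
  simp only [specB, hany]
  rfl

-- root counting as a Finset cardinality
def rootN (L : List (Int × Int)) : Nat :=
  (((L.map Prod.fst).toFinset ∪ (L.map Prod.snd).toFinset).filter (fun x => ccN L x = 0)).card

lemma countP_roots (L : List (Int × Int)) :
    ((nodesOf L).countP (fun n => !((L.map Prod.snd).contains n))) = rootN L := by
  rw [List.countP_eq_length_filter]
  have hnd : ((nodesOf L).filter (fun n => !((L.map Prod.snd).contains n))).Nodup :=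
    (nodup_nodesOf L).filter _
  rw [← List.toFinset_card_of_nodup hnd, List.toFinset_filter]
  have hset : (nodesOf L).toFinset = (L.map Prod.fst).toFinset ∪ (L.map Prod.snd).toFinset := by
    ext x
    simp [mem_nodesOf]
  rw [hset]
  unfold rootN
  congr 1
  apply Finset.filter_congr
  intro x _
  simp [ccN, List.count_eq_zero]

lemma rootN_snoc (L : List (Int × Int)) (a b : Int) :
    (rootN (L ++ [(a, b)]) : Int) =
      rootN L + (if a ∈ L.map Prod.fst ∨ a ∈ L.map Prod.snd then 0 else 1)
        - (if ccN L b = 0 ∧ (b ∈ L.map Prod.fst ∨ b = a) then 1 else 0) := by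
  unfold rootN
  have hq' : ∀ x, ccN (L ++ [(a, b)]) x = 0 ↔ (ccN L x = 0 ∧ x ≠ b) := by
    intro x
    by_cases hxb : x = b
    · simp [ccN, hxb, List.count_append]
    · simp [ccN, hxb, List.count_append, List.count_singleton]
      exact fun _ h => hxb h.symm
  have hS' : (((L ++ [(a, b)]).map Prod.fst).toFinset ∪ ((L ++ [(a, b)]).map Prod.snd).toFinset)
      = insert a (insert b ((L.map Prod.fst).toFinset ∪ (L.map Prod.snd).toFinset)) := by
    ext x
    simp
    tauto
  have hfilt : (((L ++ [(a, b)]).map Prod.fst).toFinset ∪ ((L ++ [(a, b)]).map Prod.snd).toFinset).filter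
        (fun x => ccN (L ++ [(a, b)]) x = 0)
      = (insert a (insert b ((L.map Prod.fst).toFinset ∪ (L.map Prod.snd).toFinset))).filter
        (fun x => ccN L x = 0 ∧ x ≠ b) := by
    rw [hS']
    exact Finset.filter_congr (by intro x _; rw [hq' x])
  set T := (L.map Prod.fst).toFinset ∪ (L.map Prod.snd).toFinset with hT
  set s0 := T.filter (fun x => ccN L x = 0) with hs0
  have herase : T.filter (fun x => ccN L x = 0 ∧ x ≠ b) = s0.erase b := by
    ext x
    simp [hs0, Finset.mem_erase]
    tauto
  rw [hfilt, Finset.filter_insert, Finset.filter_insert]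
  have hqb : ¬ (ccN L b = 0 ∧ b ≠ b) := by simp
  rw [if_neg hqb, herase]
  have hbT : b ∈ T ↔ b ∈ L.map Prod.fst ∨ b ∈ L.map Prod.snd := by simp [hT]
  have haT : a ∈ T ↔ a ∈ L.map Prod.fst ∨ a ∈ L.map Prod.snd := by simp [hT]
  have hbc : ccN L b = 0 ↔ b ∉ L.map Prod.snd := by simp [ccN, List.count_eq_zero]
  have hac : ccN L a = 0 ↔ a ∉ L.map Prod.snd := by simp [ccN, List.count_eq_zero]
  have hmemf : ∀ x, x ∈ s0 ↔ x ∈ T ∧ ccN L x = 0 := by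
    intro x; simp [hs0]
  have hbm_iff : b ∈ s0 ↔ (ccN L b = 0 ∧ b ∈ L.map Prod.fst) := by
    rw [hmemf b, hbT]
    constructor
    · rintro ⟨h1 | h2, h0⟩
      · exact ⟨h0, h1⟩
      · exact absurd h2 (hbc.1 h0)
    · rintro ⟨h0, h1⟩; exact ⟨Or.inl h1, h0⟩
  by_cases hqa : ccN L a = 0 ∧ a ≠ b
  · rw [if_pos hqa]
    by_cases haf : a ∈ s0.erase b
    · rw [Finset.card_insert_of_mem haf]
      have haT' : a ∈ T := ((hmemf a).1 (Finset.mem_of_mem_erase haf)).1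
      rw [if_pos (haT.1 haT')]
      by_cases hbm : b ∈ s0
      · rw [Finset.card_erase_of_mem hbm]
        rw [if_pos ⟨(hbm_iff.1 hbm).1, Or.inl (hbm_iff.1 hbm).2⟩]
        have hpos : 0 < s0.card := Finset.card_pos.2 ⟨b, hbm⟩
        omega
      · rw [Finset.erase_eq_of_notMem hbm]
        rw [if_neg (by
          intro h
          rcases h.2 with h1 | h2
          · exact hbm (hbm_iff.2 ⟨h.1, h1⟩)
          · exact hqa.2 h2.symm)]
        omega
    · rw [Finset.card_insert_of_notMem haf]
      have hanT : a ∉ T := by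
        intro hmem
        exact haf (Finset.mem_erase.2 ⟨hqa.2, (hmemf a).2 ⟨hmem, hqa.1⟩⟩)
      rw [if_neg (by rw [haT] at hanT; exact hanT)]
      by_cases hbm : b ∈ s0
      · rw [Finset.card_erase_of_mem hbm]
        rw [if_pos ⟨(hbm_iff.1 hbm).1, Or.inl (hbm_iff.1 hbm).2⟩]
        have hpos : 0 < s0.card := Finset.card_pos.2 ⟨b, hbm⟩
        omega
      · rw [Finset.erase_eq_of_notMem hbm]
        rw [if_neg (by
          intro h
          rcases h.2 with h1 | h2
          · exact hbm (hbm_iff.2 ⟨h.1, h1⟩)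
          · exact hqa.2 h2.symm)]
        omega
  · -- second big branch: the a-insert does not happen
    rw [if_neg hqa]
    by_cases hab : a = b
    · subst hab
      -- a = b: decrement iff ccN L a = 0 (then b=a cond holds); increment iff a ∉ T
      by_cases hbm : a ∈ s0
      · rw [Finset.card_erase_of_mem hbm]
        rw [if_pos (haT.1 ((hmemf _).1 hbm).1)]
        rw [if_pos ⟨(hbm_iff.1 hbm).1, Or.inl (hbm_iff.1 hbm).2⟩]
        have hpos : 0 < s0.card := Finset.card_pos.2 ⟨_, hbm⟩
        omega
      · rw [Finset.erase_eq_of_notMem hbm]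
        by_cases haT' : a ∈ T
        · rw [if_pos (haT.1 haT')]
          have hdec : ¬ (ccN L a = 0 ∧ (a ∈ L.map Prod.fst ∨ a = a)) := by
            intro h
            -- then a ∈ s0 contradicting hbm (note b = a here)
            exact hbm ((hmemf a).2 ⟨haT', h.1⟩)
          rw [if_neg hdec]
          omega
        · rw [if_neg (by rw [haT] at haT'; exact haT')]
          have ha0 : ccN L a = 0 := hac.2 (fun h => haT' (hT ▸ Finset.mem_union_right _ (List.mem_toFinset.2 h)))
          rw [if_pos ⟨ha0, Or.inr rfl⟩]
          omega
    · -- a ≠ b, and ccN L a ≠ 0 (else hqa would hold) → a ∈ map snd → a ∈ T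
      have hcc : ¬ ccN L a = 0 := fun h => hqa ⟨h, hab⟩
      have haT' : a ∈ T := hT ▸ Finset.mem_union_right _ (List.mem_toFinset.2 (by
        by_contra h; exact hcc (hac.2 h)))
      rw [if_pos (haT.1 haT')]
      by_cases hbm : b ∈ s0
      · rw [Finset.card_erase_of_mem hbm]
        rw [if_pos ⟨(hbm_iff.1 hbm).1, Or.inl (hbm_iff.1 hbm).2⟩]
        have hpos : 0 < s0.card := Finset.card_pos.2 ⟨b, hbm⟩
        omega
      · rw [Finset.erase_eq_of_notMem hbm]
        rw [if_neg (by
          intro h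
          rcases h.2 with h1 | h2
          · exact hbm (hbm_iff.2 ⟨h.1, h1⟩)
          · exact hab h2.symm)]
        omega

lemma pcN_snoc (L : List (Int × Int)) (a b x : Int) :
    pcN (L ++ [(a, b)]) x = pcN L x + (if x = a then 1 else 0) := by
  by_cases h : x = a
  · simp [pcN, List.count_append, h]
  · simp [pcN, List.count_append, h]
    exact List.count_eq_zero.mpr (by simp [h])

lemma ccN_snoc (L : List (Int × Int)) (a b x : Int) :
    ccN (L ++ [(a, b)]) x = ccN L x + (if x = b then 1 else 0) := by
  by_cases h : x = b
  · simp [ccN, List.count_append, h]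
  · simp [ccN, List.count_append, h]
    exact List.count_eq_zero.mpr (by simp [h])

lemma pcN_mid (done rest : List (Int × Int)) (a b : Int) :
    pcN done a + 1 ≤ pcN (done ++ (a, b) :: rest) a := by
  simp [pcN, List.count_append]

lemma ccN_mid (done rest : List (Int × Int)) (a b : Int) :
    ccN done b + 1 ≤ ccN (done ++ (a, b) :: rest) b := by
  simp [ccN, List.count_append]

lemma pcN_zero_iff (L : List (Int × Int)) (x : Int) : pcN L x = 0 ↔ x ∉ L.map Prod.fst := by
  simp [pcN, List.count_eq_zero]

lemma ccN_zero_iff (L : List (Int × Int)) (x : Int) : ccN L x = 0 ↔ x ∉ L.map Prod.snd := by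
  simp [ccN, List.count_eq_zero]

lemma get?_two_inserts (tree : PySem.Dict Int (Option Int × Option Int × Option Int))
    (a b : Int) (ea eb : Option Int × Option Int × Option Int) (x : Int) :
    ((tree.insert a ea).insert b eb).get? x
      = if x = b then some eb else if x = a then some ea else tree.get? x := by
  rw [PySem.Dict.get?_insert, PySem.Dict.get?_insert]

lemma inv1_step (done : List (Int × Int)) (a b : Int)
    (tree : PySem.Dict Int (Option Int × Option Int × Option Int))
    (ea eb : Option Int × Option Int × Option Int)
    (h1 : ∀ x, tree.get? x = none ↔ (pcN done x = 0 ∧ ccN done x = 0)) :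
    ∀ x, ((tree.insert a ea).insert b eb).get? x = none
      ↔ (pcN (done ++ [(a, b)]) x = 0 ∧ ccN (done ++ [(a, b)]) x = 0) := by
  intro x
  rw [get?_two_inserts, pcN_snoc, ccN_snoc]
  by_cases hxb : x = b
  · simp [hxb]
  · by_cases hxa : x = a
    · rw [if_neg hxb, if_pos hxa]
      simp [hxa]
    · simp [hxb, hxa, h1 x]

lemma inv3_step (done : List (Int × Int)) (a b : Int)
    (h3 : ∀ x, pcN done x ≤ 2 ∧ ccN done x ≤ 1)
    (hpa : pcN done a ≤ 1) (hcb : ccN done b = 0) :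
    ∀ x, pcN (done ++ [(a, b)]) x ≤ 2 ∧ ccN (done ++ [(a, b)]) x ≤ 1 := by
  intro x
  rw [pcN_snoc, ccN_snoc]
  have := h3 x
  constructor
  · by_cases hxa : x = a
    · subst hxa; simp; omega
    · simp [hxa]; omega
  · by_cases hxb : x = b
    · subst hxb; simp [hcb]
    · simp [hxb]; omega

lemma inv2_step (done : List (Int × Int)) (a b : Int)
    (tree : PySem.Dict Int (Option Int × Option Int × Option Int))
    (ea eb : Option Int × Option Int × Option Int)
    (h2 : ∀ x l r p, tree.get? x = some (l, r, p) →
      (l = none ↔ pcN done x = 0) ∧ (r = none ↔ pcN done x ≤ 1) ∧ (p = none ↔ ccN done x = 0))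
    (hea : a ≠ b → (ea.1 = none ↔ pcN done a + 1 = 0) ∧ (ea.2.1 = none ↔ pcN done a + 1 ≤ 1)
        ∧ (ea.2.2 = none ↔ ccN done a = 0))
    (heb1 : eb.1 = none ↔ pcN done b + (if b = a then 1 else 0) = 0)
    (heb2 : eb.2.1 = none ↔ pcN done b + (if b = a then 1 else 0) ≤ 1)
    (heb3 : eb.2.2 ≠ none) :
    ∀ x l r p, ((tree.insert a ea).insert b eb).get? x = some (l, r, p) →
      (l = none ↔ pcN (done ++ [(a, b)]) x = 0) ∧ (r = none ↔ pcN (done ++ [(a, b)]) x ≤ 1)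
        ∧ (p = none ↔ ccN (done ++ [(a, b)]) x = 0) := by
  intro x l r p hget
  rw [get?_two_inserts] at hget
  rw [pcN_snoc, ccN_snoc]
  by_cases hxb : x = b
  · rw [if_pos hxb] at hget
    have heq : eb = (l, r, p) := by injection hget
    subst heq
    subst hxb
    refine ⟨by simpa using heb1, by simpa using heb2, ?_⟩
    rw [if_pos rfl]
    constructor
    · intro h; exact absurd h heb3
    · intro h; omega
  · rw [if_neg hxb] at hget
    by_cases hxa : x = a
    · rw [if_pos hxa] at hget
      have heq : ea = (l, r, p) := by injection hget
      subst heq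
      subst hxa
      have hne : x ≠ b := hxb
      have h := hea (hne)
      rw [if_pos rfl, if_neg hxb]
      simpa using h
    · rw [if_neg hxa] at hget
      have h := h2 x l r p hget
      rw [if_neg hxa, if_neg hxb]
      simpa using h

lemma specB_false_parent (done rest' : List (Int × Int)) (a b : Int)
    (h : 2 ≤ pcN done a) : specB (done ++ (a, b) :: rest') = false := by
  apply specB_false_of_bad _ a
  · left; simp
  · left
    have := pcN_mid done rest' a b
    omega

lemma specB_false_child (done rest' : List (Int × Int)) (a b : Int)
    (h : 1 ≤ ccN done b) : specB (done ++ (a, b) :: rest') = false := by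
  apply specB_false_of_bad _ b
  · right; simp
  · right
    have := ccN_mid done rest' a b
    omega

-- finishing a successful iteration: re-establish all four invariants and use the IH
lemma isbt_finish (rest' done : List (Int × Int)) (a b : Int)
    (tree : PySem.Dict Int (Option Int × Option Int × Option Int))
    (ea eb : Option Int × Option Int × Option Int) (rc2 : Int)
    (ih : ∀ (done : List (Int × Int)) (rc : Int)
      (tree : PySem.Dict Int (Option Int × Option Int × Option Int)),
      (∀ x, tree.get? x = none ↔ (pcN done x = 0 ∧ ccN done x = 0)) →
      (∀ x l r p, tree.get? x = some (l, r, p) →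
        (l = none ↔ pcN done x = 0) ∧ (r = none ↔ pcN done x ≤ 1) ∧ (p = none ↔ ccN done x = 0)) →
      (∀ x, pcN done x ≤ 2 ∧ ccN done x ≤ 1) →
      rc = (rootN done : Int) →
      isbtLoop rc tree rest' = specB (done ++ rest'))
    (h1 : ∀ x, tree.get? x = none ↔ (pcN done x = 0 ∧ ccN done x = 0))
    (h2 : ∀ x l r p, tree.get? x = some (l, r, p) →
      (l = none ↔ pcN done x = 0) ∧ (r = none ↔ pcN done x ≤ 1) ∧ (p = none ↔ ccN done x = 0))
    (h3 : ∀ x, pcN done x ≤ 2 ∧ ccN done x ≤ 1)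
    (hea : a ≠ b → (ea.1 = none ↔ pcN done a + 1 = 0) ∧ (ea.2.1 = none ↔ pcN done a + 1 ≤ 1)
        ∧ (ea.2.2 = none ↔ ccN done a = 0))
    (heb1 : eb.1 = none ↔ pcN done b + (if b = a then 1 else 0) = 0)
    (heb2 : eb.2.1 = none ↔ pcN done b + (if b = a then 1 else 0) ≤ 1)
    (heb3 : eb.2.2 ≠ none)
    (hpa : pcN done a ≤ 1) (hcb : ccN done b = 0)
    (hrc2 : rc2 = (rootN (done ++ [(a, b)]) : Int)) :
    isbtLoop rc2 ((tree.insert a ea).insert b eb) rest' = specB (done ++ (a, b) :: rest') := by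
  have hassoc : done ++ (a, b) :: rest' = (done ++ [(a, b)]) ++ rest' := by simp
  rw [hassoc]
  exact ih (done ++ [(a, b)]) rc2 ((tree.insert a ea).insert b eb)
    (inv1_step done a b tree ea eb h1)
    (inv2_step done a b tree ea eb h2 hea heb1 heb2 heb3)
    (inv3_step done a b h3 hpa hcb)
    hrc2

lemma loopA (rest : List (Int × Int)) : ∀ (done : List (Int × Int)) (rc : Int)
    (tree : PySem.Dict Int (Option Int × Option Int × Option Int)),
    (∀ x, tree.get? x = none ↔ (pcN done x = 0 ∧ ccN done x = 0)) →
    (∀ x l r p, tree.get? x = some (l, r, p) →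
      (l = none ↔ pcN done x = 0) ∧ (r = none ↔ pcN done x ≤ 1) ∧ (p = none ↔ ccN done x = 0)) →
    (∀ x, pcN done x ≤ 2 ∧ ccN done x ≤ 1) →
    rc = (rootN done : Int) →
    isbtLoop rc tree rest = specB (done ++ rest) := by
  induction rest with
  | nil =>
    intro done rc tree h1 h2 h3 h4
    have hany : ((nodesOf done).any fun n => decide ((((done.map Prod.fst).count n : Int)) > 2)
        || decide ((((done.map Prod.snd).count n : Int)) > 1)) = false := by
      rw [List.any_eq_false]
      intro n _
      have := h3 n
      unfold pcN ccN at this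
      simp
      omega
    simp only [List.append_nil, isbtLoop, specB, hany, Bool.false_eq_true, if_false]
    rw [countP_roots, h4]
  | cons hd rest' ih =>
    obtain ⟨a, b⟩ := hd
    intro done rc tree h1 h2 h3 h4
    have hroot := rootN_snoc done a b
    rcases hp : tree.get? a with _ | ⟨l, r, pp⟩
    · -- parent fresh: entry (some b, none, none), rc+1
      have hfa := (h1 a).1 hp
      have hnm : ¬ (a ∈ done.map Prod.fst ∨ a ∈ done.map Prod.snd) := by
        rw [not_or]
        exact ⟨(pcN_zero_iff done a).1 hfa.1, (ccN_zero_iff done a).1 hfa.2⟩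
      rw [if_neg hnm] at hroot
      simp only [isbtLoop, isbtStepParent, hp]
      by_cases hba : b = a
      · -- self loop on fresh node: child branch sets parent, rc back down
        subst hba
        simp only [isbtStepChild, PySem.Dict.get?_insert_self]
        refine isbt_finish rest' done b b tree _ _ _ ih h1 h2 h3 ?_ ?_ ?_ ?_ ?_ hfa.2 ?_
        · intro h; exact absurd rfl h
        · simp
        · simp [hfa.1]
        · simp
        · omega
        · rw [if_pos ⟨hfa.2, Or.inr rfl⟩] at hroot
          omega
      · have hgb : ((tree.insert a (some b, none, none)).get? b) = tree.get? b :=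
          PySem.Dict.get?_insert_of_ne _ _ hba
        rcases hq : tree.get? b with _ | ⟨l', r', p'⟩
        · -- child fresh too
          have hfb := (h1 b).1 hq
          simp only [isbtStepChild, hgb, hq]
          refine isbt_finish rest' done a b tree _ _ _ ih h1 h2 h3 ?_ ?_ ?_ ?_ ?_ hfb.2 ?_
          · intro _
            refine ⟨by simp, by simp [hfa.1], by simp [hfa.2]⟩
          · simp [hba, hfb.1]
          · simp [hba, hfb.1]
          · simp
          · omega
          · rw [if_neg (by
              intro h
              exact hba ((or_iff_right ((pcN_zero_iff done b).1 hfb.1)).1 h.2))] at hroot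
            omega
        · -- child exists: needs parent slot free
          have hfb := h2 b l' r' p' hq
          have hnb : ¬ (pcN done b = 0 ∧ ccN done b = 0) := by
            intro hc
            rw [(h1 b).2 hc] at hq
            cases hq
          simp only [isbtStepChild, hgb, hq]
          by_cases hpn : p' = none
          · have hcb := hfb.2.2.1 hpn
            have hbf : b ∈ done.map Prod.fst := by
              by_contra hnf
              exact hnb ⟨(pcN_zero_iff done b).2 hnf, hcb⟩
            simp only [hpn, if_pos]
            refine isbt_finish rest' done a b tree _ _ _ ih h1 h2 h3 ?_ ?_ ?_ ?_ ?_ hcb ?_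
            · intro _
              refine ⟨by simp, by simp [hfa.1], by simp [hfa.2]⟩
            · simp [hba]
              exact hfb.1
            · simp [hba]
              exact hfb.2.1
            · simp
            · omega
            · rw [if_pos ⟨hcb, Or.inl hbf⟩] at hroot
              omega
          · -- second parent for b: fail
            have hcb : 1 ≤ ccN done b := by
              rcases Nat.eq_zero_or_pos (ccN done b) with h0 | h0
              · exact absurd (hfb.2.2.2 h0) hpn
              · exact h0
            simp only [hpn, if_false]
            exact (specB_false_child done rest' a b hcb).symm
    · -- parent already present
      have hsome := h2 a l r pp hp
      have hna : ¬ (pcN done a = 0 ∧ ccN done a = 0) := by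
        intro hc
        rw [(h1 a).2 hc] at hp
        cases hp
      by_cases hl : l = none
      · -- left slot free: pcN done a = 0, so a appeared only as a child
        have hpa0 : pcN done a = 0 := hsome.1.1 hl
        have hccna : ¬ ccN done a = 0 := fun h => hna ⟨hpa0, h⟩
        have hr : r = none := hsome.2.1.2 (by omega)
        rw [if_pos (Or.inr ((by
          by_contra hnf
          exact hccna ((ccN_zero_iff done a).2 hnf)) : a ∈ done.map Prod.snd))] at hroot
        simp only [isbtLoop, isbtStepParent, hp, hl, if_pos]
        by_cases hba : b = a
        · -- a already has a parent (ccN a ≠ 0): child step fails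
          subst hba
          simp only [isbtStepChild, PySem.Dict.get?_insert_self]
          have hppn : ¬ pp = none := fun h => hccna (hsome.2.2.1 h)
          simp only [hppn, if_false]
          exact (specB_false_child done rest' b b (by omega)).symm
        · have hgb : ((tree.insert a (some b, r, pp)).get? b) = tree.get? b :=
            PySem.Dict.get?_insert_of_ne _ _ hba
          rcases hq : tree.get? b with _ | ⟨l', r', p'⟩
          · have hfb := (h1 b).1 hq
            simp only [isbtStepChild, hgb, hq]
            refine isbt_finish rest' done a b tree _ _ _ ih h1 h2 h3 ?_ ?_ ?_ ?_ ?_ hfb.2 ?_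
            · intro _
              refine ⟨by simp, by simp [hr, hpa0], by simpa using hsome.2.2⟩
            · simp [hba, hfb.1]
            · simp [hba, hfb.1]
            · simp
            · omega
            · rw [if_neg (by
                intro h
                exact hba ((or_iff_right ((pcN_zero_iff done b).1 hfb.1)).1 h.2))] at hroot
              omega
          · have hfb := h2 b l' r' p' hq
            have hnb : ¬ (pcN done b = 0 ∧ ccN done b = 0) := by
              intro hc
              rw [(h1 b).2 hc] at hq
              cases hq
            simp only [isbtStepChild, hgb, hq]
            by_cases hpn : p' = none
            · have hcb := hfb.2.2.1 hpn
              have hbf : b ∈ done.map Prod.fst := by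
                by_contra hnf
                exact hnb ⟨(pcN_zero_iff done b).2 hnf, hcb⟩
              simp only [hpn, if_pos]
              refine isbt_finish rest' done a b tree _ _ _ ih h1 h2 h3 ?_ ?_ ?_ ?_ ?_ hcb ?_
              · intro _
                refine ⟨by simp, by simp [hr, hpa0], by simpa using hsome.2.2⟩
              · simp [hba]
                exact hfb.1
              · simp [hba]
                exact hfb.2.1
              · simp
              · omega
              · rw [if_pos ⟨hcb, Or.inl hbf⟩] at hroot
                omega
            · have hcb : 1 ≤ ccN done b := by
                rcases Nat.eq_zero_or_pos (ccN done b) with h0 | h0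
                · exact absurd (hfb.2.2.2 h0) hpn
                · exact h0
              simp only [hpn, if_false]
              exact (specB_false_child done rest' a b hcb).symm
      · by_cases hr : r = none
        · -- right slot free: pcN done a = 1
          have hpa1 : pcN done a = 1 := by
            have := hsome.2.1.1 hr
            have := hsome.1
            have hne : ¬ pcN done a = 0 := fun h => hl (hsome.1.2 h)
            omega
          have haf : a ∈ done.map Prod.fst := by
            by_contra hnf
            have := (pcN_zero_iff done a).2 hnf
            omega
          rw [if_pos (Or.inl haf)] at hroot
          simp only [isbtLoop, isbtStepParent, hp, hr]
          rw [if_neg hl]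
          simp only [if_pos]
          by_cases hba : b = a
          · subst hba
            simp only [isbtStepChild, PySem.Dict.get?_insert_self]
            by_cases hppn : pp = none
            · have hca : ccN done b = 0 := hsome.2.2.1 hppn
              simp only [hppn, if_pos]
              refine isbt_finish rest' done b b tree _ _ _ ih h1 h2 h3 ?_ ?_ ?_ ?_ ?_ hca ?_
              · intro h; exact absurd rfl h
              · exact iff_of_false hl (by omega)
              · exact iff_of_false (by simp) (by simp; omega)
              · simp
              · omega
              · rw [if_pos ⟨hca, Or.inr rfl⟩] at hroot
                omega
            · have hca : 1 ≤ ccN done b := by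
                rcases Nat.eq_zero_or_pos (ccN done b) with h0 | h0
                · exact absurd (hsome.2.2.2 h0) hppn
                · exact h0
              simp only [hppn, if_false]
              exact (specB_false_child done rest' b b hca).symm
          · have hgb : ((tree.insert a (l, some b, pp)).get? b) = tree.get? b :=
              PySem.Dict.get?_insert_of_ne _ _ hba
            rcases hq : tree.get? b with _ | ⟨l', r', p'⟩
            · have hfb := (h1 b).1 hq
              simp only [isbtStepChild, hgb, hq]
              refine isbt_finish rest' done a b tree _ _ _ ih h1 h2 h3 ?_ ?_ ?_ ?_ ?_ hfb.2 ?_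
              · intro _
                refine ⟨iff_of_false hl (by omega), iff_of_false (by simp) (by omega),
                  by simpa using hsome.2.2⟩
              · simp [hba, hfb.1]
              · simp [hba, hfb.1]
              · simp
              · omega
              · rw [if_neg (by
                  intro h
                  exact hba ((or_iff_right ((pcN_zero_iff done b).1 hfb.1)).1 h.2))] at hroot
                omega
            · have hfb := h2 b l' r' p' hq
              have hnb : ¬ (pcN done b = 0 ∧ ccN done b = 0) := by
                intro hc
                rw [(h1 b).2 hc] at hq
                cases hq
              simp only [isbtStepChild, hgb, hq]
              by_cases hpn : p' = none
              · have hcb := hfb.2.2.1 hpn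
                have hbf : b ∈ done.map Prod.fst := by
                  by_contra hnf
                  exact hnb ⟨(pcN_zero_iff done b).2 hnf, hcb⟩
                simp only [hpn, if_pos]
                refine isbt_finish rest' done a b tree _ _ _ ih h1 h2 h3 ?_ ?_ ?_ ?_ ?_ hcb ?_
                · intro _
                  refine ⟨iff_of_false hl (by omega), iff_of_false (by simp) (by omega),
                    by simpa using hsome.2.2⟩
                · simp [hba]
                  exact hfb.1
                · simp [hba]
                  exact hfb.2.1
                · simp
                · omega
                · rw [if_pos ⟨hcb, Or.inl hbf⟩] at hroot
                  omega
              · have hcb : 1 ≤ ccN done b := by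
                  rcases Nat.eq_zero_or_pos (ccN done b) with h0 | h0
                  · exact absurd (hfb.2.2.2 h0) hpn
                  · exact h0
                simp only [hpn, if_false]
                exact (specB_false_child done rest' a b hcb).symm
        · -- both slots taken: fail
          have hpa2 : 2 ≤ pcN done a := by
            have hle := hsome.2.1
            have hnotle : ¬ pcN done a ≤ 1 := fun h => hr (hle.2 h)
            omega
          simp only [isbtLoop, isbtStepParent, hp, hl, hr, if_false]
          exact (specB_false_parent done rest' a b hpa2).symm

-- ===== VERDICT (by name: the statement is the Claim_ definition above) =====
theorem is_biniary_tree_spec : Claim_equal_is_biniary_tree := by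
  intro L _
  unfold Spec_is_biniary_tree
  rw [alt_eq_specB]
  have h := loopA L [] 0 PySem.Dict.empty
    (by intro x; simp [PySem.Dict.get?_empty, pcN, ccN])
    (by intro x l r p hx; simp [PySem.Dict.get?_empty] at hx)
    (by intro x; simp [pcN, ccN])
    (by simp [rootN])
  simpa [is_biniary_tree] using h
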